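-- pv_equiv track=rewrite | github.com/glk1001/barks-compleat-reader | src/barks-fantagraphics/tests/test_barks_titles.py | get_title_var
-- ===== SOURCE A (Python) =====
-- import string
--
-- def get_title_var(title: str) -> str:
--     enum_var = title.upper()
--
--     enum_var = enum_var.replace(" ", "_")
--     enum_var = enum_var.replace("-", "_")
--
--     str_punc = string.punctuation
--     str_punc = str_punc.replace("_", "")
--     str_punc = str_punc.replace("-", "")
--     for punc in str_punc:
--         enum_var = enum_var.replace(punc, "")
--
--     if enum_var.startswith("THE_"):
--         enum_var = enum_var[4:] + "_THE"
--     elif enum_var.startswith("A_"):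
--         enum_var = enum_var[2:] + "_A"
--
--     return enum_var
-- ===== SOURCE B (Python) =====
-- import string
--
--
-- def get_title_var(title: str) -> str:
--     drop = set(string.punctuation) - {"_", "-"}
--     out = []
--     for ch in title.upper():
--         if ch == " " or ch == "-":
--             out.append("_")
--         elif ch in drop:
--             continue
--         else:
--             out.append(ch)
--     enum_var = "".join(out)
--
--     if enum_var.startswith("THE_"):
--         return enum_var[4:] + "_THE"
--     if enum_var.startswith("A_"):
--         return enum_var[2:] + "_A"
--     return enum_var
-- ===== Notes on version B (the rewrite author's own statement) =====
-- stated objective: simpler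
-- what changed: A rescans the whole string with ~30 successive str.replace passes (one per punctuation character); B makes a single pass over the characters of the uppercased title, emitting an underscore for space/hyphen, skipping other punctuation, keeping everything else, then applies the same THE/A prefix swap.
import Mathlib
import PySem

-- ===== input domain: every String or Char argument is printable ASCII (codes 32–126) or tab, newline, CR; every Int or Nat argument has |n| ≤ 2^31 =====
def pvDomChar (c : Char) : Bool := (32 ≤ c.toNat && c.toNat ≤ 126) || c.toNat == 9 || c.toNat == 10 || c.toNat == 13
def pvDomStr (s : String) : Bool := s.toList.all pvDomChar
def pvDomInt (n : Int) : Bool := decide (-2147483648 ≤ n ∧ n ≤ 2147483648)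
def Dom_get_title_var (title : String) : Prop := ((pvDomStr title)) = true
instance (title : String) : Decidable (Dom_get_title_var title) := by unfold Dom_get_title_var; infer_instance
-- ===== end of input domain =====

-- B replaces A's ~30 whole-string replace scans by a single pass over the characters (simpler, one traversal).

-- ===== PORT A =====
-- string.punctuation (a CPython constant)
def pyPunctuation : String := "!\"#$%&'()*+,-./:;<=>?@[\\]^_`{|}~"

def get_title_var (title : String) : String :=
  let enum1 := PySem.Str.upper title
  let enum2 := PySem.Str.replace enum1 " " "_"
  let enum3 := PySem.Str.replace enum2 "-" "_"
  let strPunc := PySem.Str.replace (PySem.Str.replace pyPunctuation "_" "") "-" ""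
  -- 'for punc in str_punc: enum_var = enum_var.replace(punc, "")' (punc is a 1-char string)
  let enum4 := strPunc.toList.foldl (fun e p => PySem.Str.replace e (String.ofList [p]) "") enum3
  if PySem.Str.startswith enum4 "THE_" then PySem.Str.slice enum4 (some 4) none ++ "_THE"
  else if PySem.Str.startswith enum4 "A_" then PySem.Str.slice enum4 (some 2) none ++ "_A"
  else enum4

-- ===== PORT B =====
-- Source B's literal _DROP = string.punctuation without "_" and "-"
def pvDrop : String := "!\"#$%&'()*+,./:;<=>?@[\\]^`{|}~"

def get_title_var_alt (title : String) : String :=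
  -- the for/append loop over title.upper(); 'ch in _DROP' for a 1-char ch is char membership
  let out := (PySem.Str.upper title).toList.foldl
      (fun acc ch =>
        if ch = ' ' ∨ ch = '-' then acc ++ ['_']
        else if pvDrop.toList.contains ch then acc
        else acc ++ [ch]) []
  let enum := String.ofList out
  if PySem.Str.startswith enum "THE_" then PySem.Str.slice enum (some 4) none ++ "_THE"
  else if PySem.Str.startswith enum "A_" then PySem.Str.slice enum (some 2) none ++ "_A"
  else enum

-- ===== PRECONDITION & SPEC =====
def Spec_get_title_var (title : String) (out : String) : Prop := out = get_title_var_alt title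
instance (title : String) (out : String) : Decidable (Spec_get_title_var title out) := by unfold Spec_get_title_var; infer_instance

-- ===== CLAIM (what is proved, stated in full; the proofs are below) =====
def Claim_equal_get_title_var : Prop := ∀ (title : String), Dom_get_title_var title → Spec_get_title_var title (get_title_var title)

-- ===== LEMMAS AND PROOFS =====

-- single-character replace is a per-character flatMap
theorem replace_go_single (c : Char) (new : List Char) :
    ∀ (l : List Char) (fuel : Nat) (acc : List Char), l.length ≤ fuel →
    PySem.Chars.replace.go [c] new fuel l acc
      = acc.reverse ++ l.flatMap (fun x => if x = c then new else [x]) := by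
  intro l
  induction l with
  | nil =>
      intro fuel acc _
      cases fuel <;> simp [PySem.Chars.replace.go]
  | cons x t ih =>
      intro fuel acc h
      cases fuel with
      | zero => simp at h
      | succ f =>
          rw [PySem.Chars.replace.go]
          by_cases hx : x = c
          · subst hx
            simp [List.isPrefixOf, ih f (new.reverse ++ acc) (by simpa using Nat.le_of_succ_le_succ h)]
          · have hpre : [c].isPrefixOf (x :: t) = false := by
              simp [List.isPrefixOf]
              exact fun hc => hx hc.symm
            rw [hpre]
            simp [ih f (x :: acc) (by simpa using Nat.le_of_succ_le_succ h), hx]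

theorem replace_single (l : List Char) (c : Char) (new : List Char) :
    PySem.Chars.replace l [c] new = l.flatMap (fun x => if x = c then new else [x]) := by
  simpa using replace_go_single c new l l.length [] (le_refl _)

-- deleting each character of ps in turn = one filter
theorem fold_delete (ps : List Char) :
    ∀ (l : List Char),
    ps.foldl (fun e p => e.flatMap (fun x => if x = p then [] else [x])) l
      = l.filter (fun x => !ps.contains x) := by
  induction ps with
  | nil => intro l; simp
  | cons p ps ih =>
      intro l
      have h1 : l.flatMap (fun x => if x = p then [] else [x]) = l.filter (fun x => !(x == p)) := by
        induction l with
        | nil => simp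
        | cons y ys ihy =>
            by_cases hy : y = p <;> simp [hy, ihy]
      simp only [List.foldl_cons, ih, h1, List.filter_filter]
      apply List.filter_congr
      intro x _
      by_cases hx : x = p <;> simp [hx]

-- the String-level fold of A mirrors the list-level fold
theorem fold_replace_toList (ps : List Char) :
    ∀ (s : String),
    (ps.foldl (fun e p => PySem.Str.replace e (String.ofList [p]) "") s).toList
      = ps.foldl (fun e p => e.flatMap (fun x => if x = p then [] else [x])) s.toList := by
  induction ps with
  | nil => intro s; simp
  | cons p ps ih =>
      intro s
      simp only [List.foldl_cons, ih, PySem.Str.toList_replace]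
      simp only [String.toList_ofList]
      rw [show ("" : String).toList = [] from rfl, replace_single]

theorem enum_eq (L : List Char) :
    ((L.flatMap (fun x => if x = ' ' then ['_'] else [x])).flatMap
        (fun x => if x = '-' then ['_'] else [x])).filter
        (fun x => !(("!\"#$%&'()*+,./:;<=>?@[\\]^`{|}~" : String).toList.contains x))
      = L.flatMap (fun ch =>
          if ch = ' ' ∨ ch = '-' then ['_']
          else if pvDrop.toList.contains ch then [] else [ch]) := by
  rw [List.flatMap_assoc, List.filter_flatMap]
  apply List.flatMap_congr
  intro ch _
  by_cases h1 : ch = ' '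
  · subst h1; decide
  · by_cases h2 : ch = '-'
    · subst h2; decide
    · have hd : (("!\"#$%&'()*+,./:;<=>?@[\\]^`{|}~" : String)) = pvDrop := rfl
      rw [hd]
      by_cases hc : ch ∈ pvDrop.toList <;>
        simp [h1, h2, hc]

theorem get_title_var_spec' : ∀ (title : String),
    get_title_var title = get_title_var_alt title := by
  intro title
  have hpunc : (PySem.Str.replace (PySem.Str.replace pyPunctuation "_" "") "-" "").toList
      = ("!\"#$%&'()*+,./:;<=>?@[\\]^`{|}~" : String).toList := by decide
  have hout :
      ((PySem.Str.upper title).toList.foldl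
        (fun acc ch =>
          if ch = ' ' ∨ ch = '-' then acc ++ ['_']
          else if pvDrop.toList.contains ch then acc
          else acc ++ [ch]) [])
      = (PySem.Str.upper title).toList.flatMap (fun ch =>
          if ch = ' ' ∨ ch = '-' then ['_']
          else if pvDrop.toList.contains ch then [] else [ch]) := by
    have hfun : (fun (acc : List Char) (ch : Char) =>
          if ch = ' ' ∨ ch = '-' then acc ++ ['_']
          else if pvDrop.toList.contains ch then acc
          else acc ++ [ch])
        = (fun acc ch => acc ++
            (if ch = ' ' ∨ ch = '-' then ['_']
             else if pvDrop.toList.contains ch then [] else [ch])) := by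
      funext acc ch
      by_cases h1 : ch = ' ' ∨ ch = '-' <;> by_cases h2 : ch ∈ pvDrop.toList <;>
        simp [h1, h2]
    rw [hfun, PySem.List.foldl_append_eq_flatMap]
    simp
  have hEq :
      (((PySem.Str.replace (PySem.Str.replace pyPunctuation "_" "") "-" "").toList).foldl
          (fun e p => PySem.Str.replace e (String.ofList [p]) "")
          (PySem.Str.replace (PySem.Str.replace (PySem.Str.upper title) " " "_") "-" "_"))
      = String.ofList ((PySem.Str.upper title).toList.foldl
          (fun acc ch =>
            if ch = ' ' ∨ ch = '-' then acc ++ ['_']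
            else if pvDrop.toList.contains ch then acc
            else acc ++ [ch]) []) := by
    apply String.toList_injective
    rw [String.toList_ofList, hout]
    rw [fold_replace_toList, fold_delete, hpunc]
    simp only [PySem.Str.toList_replace]
    rw [show ("-" : String).toList = ['-'] from rfl,
        show (" " : String).toList = [' '] from rfl,
        show ("_" : String).toList = ['_'] from rfl]
    rw [replace_single, replace_single]
    exact enum_eq _
  simp only [get_title_var, get_title_var_alt, hEq]

-- ===== VERDICT (by name: the statement is the Claim_ definition above) =====
theorem get_title_var_spec : Claim_equal_get_title_var := by
  intro title _
  unfold Spec_get_title_var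
  exact get_title_var_spec' title
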